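-- pv_equiv track=rewrite | github.com/kitakou0313/crackingCodingInterview2nd | chap17/5.py | findLongestMatchSubarray
-- ===== SOURCE A (Python) =====
-- from typing import Dict, List
--
-- def findLongestMatchSubarray(array:List[str]) -> int:
--     """
--     ブルートフォース O(n^3)
--     """
--     maxLen = 0
--     for subArrayLength in range(1,len(array)+1):
--         for startInd in range(0, len(array) - (subArrayLength - 1)):
--             Anum = 0
--             Bnum = 0
--             for indInSubArray in range(startInd, startInd + subArrayLength):
--                 if array[indInSubArray] == "A":
--                     Anum += 1
--                 else:
--                     Bnum += 1
--             if Anum == Bnum: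
--                 maxLen = max(maxLen, subArrayLength)
--     return maxLen
-- ===== SOURCE B (Python) =====
-- from typing import List
--
-- def findLongestMatchSubarray(array: List[str]) -> int:
--     """
--     Prefix-balance scan: for each start keep one running balance (+1 for "A",
--     -1 otherwise) while extending the end; a zero balance marks an equal-count
--     window.  O(n^2) instead of recounting every window (O(n^3)).
--     """
--     n = len(array)
--     maxLen = 0
--     for start in range(n):
--         balance = 0
--         for end in range(start, n):
--             balance += 1 if array[end] == "A" else -1
--             if balance == 0 and end - start + 1 > maxLen:
--                 maxLen = end - start + 1
--     return maxLen
-- ===== Notes on version B (the rewrite author's own statement) =====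
-- stated objective: faster
-- what changed: Replaces the recount-every-window triple loop by a running prefix-balance per start position, so each window length is obtained in O(1) from the previous one.
import Mathlib
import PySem

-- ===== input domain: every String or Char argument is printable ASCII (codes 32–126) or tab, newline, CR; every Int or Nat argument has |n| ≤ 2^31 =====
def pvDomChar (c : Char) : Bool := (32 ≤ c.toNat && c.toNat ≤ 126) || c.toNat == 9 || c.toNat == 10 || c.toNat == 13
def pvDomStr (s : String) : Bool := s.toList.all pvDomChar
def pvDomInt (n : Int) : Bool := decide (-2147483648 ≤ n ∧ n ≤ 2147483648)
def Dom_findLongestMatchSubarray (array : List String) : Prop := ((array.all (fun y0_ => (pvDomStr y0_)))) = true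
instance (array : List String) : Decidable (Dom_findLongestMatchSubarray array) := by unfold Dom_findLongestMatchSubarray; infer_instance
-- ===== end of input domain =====

-- B replaces A's recount-every-window triple loop by a running prefix balance per start (objective: faster, O(n^2) vs O(n^3)).

-- ===== PORT A =====
def findLongestMatchSubarray (array : List String) : Int :=
  (PySem.List.pyRange 1 (PySem.List.len array + 1) 1).foldl (fun maxLen subArrayLength =>
    (PySem.List.pyRange 0 (PySem.List.len array - (subArrayLength - 1)) 1).foldl (fun maxLen startInd =>
      let p := (PySem.List.pyRange startInd (startInd + subArrayLength) 1).foldl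
        (fun (ab : Int × Int) indInSubArray =>
          if PySem.List.pyGetD array indInSubArray "" = "A" then (ab.1 + 1, ab.2) else (ab.1, ab.2 + 1))
        ((0 : Int), (0 : Int))
      if p.1 = p.2 then max maxLen subArrayLength else maxLen) maxLen) 0

-- ===== PORT B =====
def findLongestMatchSubarray_alt (array : List String) : Int :=
  (PySem.List.pyRange 0 (PySem.List.len array) 1).foldl (fun maxLen start =>
    ((PySem.List.pyRange start (PySem.List.len array) 1).foldl
      (fun (st : Int × Int) e =>
        let balance := st.1 + (if PySem.List.pyGetD array e "" = "A" then 1 else -1)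
        (balance, if balance = 0 ∧ e - start + 1 > st.2 then e - start + 1 else st.2))
      ((0 : Int), maxLen)).2) 0

-- ===== PRECONDITION & SPEC =====
def Spec_findLongestMatchSubarray (array : List String) (out : Int) : Prop := out = findLongestMatchSubarray_alt array
instance (array : List String) (out : Int) : Decidable (Spec_findLongestMatchSubarray array out) := by unfold Spec_findLongestMatchSubarray; infer_instance

-- ===== CLAIM (what is proved, stated in full; the proofs are below) =====
def Claim_equal_findLongestMatchSubarray : Prop := ∀ (array : List String), Dom_findLongestMatchSubarray array → Spec_findLongestMatchSubarray array (findLongestMatchSubarray array)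

-- ===== LEMMAS AND PROOFS =====

-- balance of one element: +1 for "A", -1 for anything else
def pvBal (s : String) : Int := if s = "A" then 1 else -1

-- balance of the window of length L starting at s
def pvW (arr : List String) (s L : Int) : Int := (((arr.drop s.toNat).take L.toNat).map pvBal).sum

-- (s, L) is a qualifying window: nonempty, in range, balanced
def pvQ (arr : List String) (s L : Int) : Prop :=
  0 ≤ s ∧ 1 ≤ L ∧ s + L ≤ (arr.length : Int) ∧ pvW arr s L = 0

-- r is the maximum qualifying window length (0 if none)
def pvIsBest (arr : List String) (r : Int) : Prop :=
  0 ≤ r ∧ (r = 0 ∨ ∃ s L, pvQ arr s L ∧ r = L) ∧ (∀ s L, pvQ arr s L → L ≤ r)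

lemma pvIsBest_le (arr : List String) (r r' : Int)
    (h : pvIsBest arr r) (h' : pvIsBest arr r') : r ≤ r' := by
  unfold pvIsBest at h h'
  obtain ⟨h0, hach, hub⟩ := h
  obtain ⟨h0', hach', hub'⟩ := h'
  rcases hach with rfl | ⟨s, L, hQ, hr⟩
  · exact h0'
  · exact hr ▸ hub' s L hQ

lemma pvIsBest_unique (arr : List String) (r r' : Int)
    (h : pvIsBest arr r) (h' : pvIsBest arr r') : r = r' :=
  le_antisymm (pvIsBest_le arr r r' h h') (pvIsBest_le arr r' r h' h)

-- generic conditional-running-max fold characterisation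
lemma pvFoldMax {α : Type} (G : Int → Prop) (C : α → Int → Prop) (f : Int → α → Int) :
    ∀ (l : List α),
    (∀ m x, x ∈ l → m ≤ f m x) →
    (∀ m x, x ∈ l → f m x = m ∨ G (f m x)) →
    (∀ m x v, x ∈ l → C x v → v ≤ f m x) →
    ∀ m, m ≤ l.foldl f m ∧ (l.foldl f m = m ∨ G (l.foldl f m)) ∧
      (∀ x ∈ l, ∀ v, C x v → v ≤ l.foldl f m) := by
  intro l
  induction l with
  | nil => intro _ _ _ m; simp
  | cons a t ih =>
    intro hle hnew hcomp m
    have hle' : ∀ m x, x ∈ t → m ≤ f m x := fun m x hx => hle m x (List.mem_cons_of_mem a hx)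
    have hnew' : ∀ m x, x ∈ t → f m x = m ∨ G (f m x) := fun m x hx => hnew m x (List.mem_cons_of_mem a hx)
    have hcomp' : ∀ m x v, x ∈ t → C x v → v ≤ f m x := fun m x v hx => hcomp m x v (List.mem_cons_of_mem a hx)
    obtain ⟨ih1, ih2, ih3⟩ := ih hle' hnew' hcomp' (f m a)
    have hma : m ≤ f m a := hle m a (List.mem_cons_self ..)
    simp only [List.foldl_cons]
    refine ⟨le_trans hma ih1, ?_, ?_⟩
    · rcases ih2 with h | h
      · rw [h]; exact hnew m a (List.mem_cons_self ..)
      · right; exact h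
    · intro x hx v hC
      rcases List.mem_cons.mp hx with rfl | hx'
      · exact le_trans (hcomp m x v (List.mem_cons_self ..) hC) ih1
      · exact ih3 x hx' v hC

lemma pvW_nonpos (arr : List String) (s L : Int) (h : L ≤ 0) : pvW arr s L = 0 := by
  simp [pvW, Int.toNat_of_nonpos h]

lemma pvW_front (arr : List String) (s L : Int) (hs : 0 ≤ s) (hlen : s.toNat < arr.length)
    (hL : 1 ≤ L) : pvW arr s L = pvBal (arr[s.toNat]) + pvW arr (s + 1) (L - 1) := by
  unfold pvW
  have h1 : (s + 1).toNat = s.toNat + 1 := by omega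
  have h2 : L.toNat = (L - 1).toNat + 1 := by omega
  rw [List.drop_eq_getElem_cons hlen, h1, h2, List.take_succ_cons]
  simp

lemma pvW_snoc (arr : List String) (s t : Int) (hs : 0 ≤ s) (hst : s ≤ t)
    (ht : t.toNat < arr.length) :
    pvW arr s (t - s + 1) = pvW arr s (t - s) + pvBal (arr[t.toNat]) := by
  unfold pvW
  have h1 : (t - s + 1).toNat = (t - s).toNat + 1 := by omega
  have hj : (t - s).toNat < (arr.drop s.toNat).length := by
    simp only [List.length_drop]; omega
  have hidx : s.toNat + (t - s).toNat = t.toNat := by omega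
  rw [h1, List.take_add_one, List.getElem?_eq_getElem hj]
  simp [List.getElem_drop, hidx]

-- A's innermost counting loop: the count difference is the window balance
lemma pvA_inner (arr : List String) :
    ∀ (L : Nat) (s a b : Int), 0 ≤ s → s + (L : Int) ≤ (arr.length : Int) →
    (((PySem.List.pyRange s (s + (L : Int)) 1).foldl
        (fun (ab : Int × Int) indInSubArray =>
          if PySem.List.pyGetD arr indInSubArray "" = "A" then (ab.1 + 1, ab.2) else (ab.1, ab.2 + 1))
        (a, b)).1) -
    (((PySem.List.pyRange s (s + (L : Int)) 1).foldl
        (fun (ab : Int × Int) indInSubArray =>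
          if PySem.List.pyGetD arr indInSubArray "" = "A" then (ab.1 + 1, ab.2) else (ab.1, ab.2 + 1))
        (a, b)).2) = a - b + pvW arr s (L : Int) := by
  intro L
  induction L with
  | zero =>
    intro s a b hs hlen
    rw [PySem.List.pyRange_one_eq_nil (by simp)]
    simp [pvW_nonpos]
  | succ L ih =>
    intro s a b hs hlen
    have he : ((L + 1 : Nat) : Int) = (L : Int) + 1 := by push_cast; ring
    rw [he] at hlen ⊢
    have hslen : s.toNat < arr.length := by omega
    rw [show s + ((L : Int) + 1) = (s + 1) + (L : Int) by ring]
    rw [PySem.List.pyRange_one_cons (by omega)]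
    simp only [List.foldl_cons]
    have hget : PySem.List.pyGetD arr s "" = arr[s.toNat] := by
      exact PySem.List.pyGetD_eq_getElem arr "" (by omega) (by omega)
    rw [hget]
    have hW : pvW arr s ((L : Int) + 1) = pvBal (arr[s.toNat]) + pvW arr (s + 1) ((L : Int)) := by
      have h := pvW_front arr s ((L : Int) + 1) hs hslen (by omega)
      simpa using h
    by_cases hA : arr[s.toNat] = "A"
    · simp only [hA, if_pos]
      rw [ih (s + 1) (a + 1) b (by omega) (by omega)]
      rw [hW]; simp [pvBal, hA]; ring
    · simp only [hA, if_false]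
      rw [ih (s + 1) a (b + 1) (by omega) (by omega)]
      rw [hW]; simp [pvBal, hA]; ring

-- B's inner loop: running balance + running max characterisation
lemma pvB_inner (arr : List String) (s : Int) (hs : 0 ≤ s) :
    ∀ (k : Nat) (t m : Int), s ≤ t → t + (k : Int) = (arr.length : Int) →
    m ≤ (((PySem.List.pyRange t (PySem.List.len arr) 1).foldl
        (fun (st : Int × Int) e =>
          let balance := st.1 + (if PySem.List.pyGetD arr e "" = "A" then 1 else -1)
          (balance, if balance = 0 ∧ e - s + 1 > st.2 then e - s + 1 else st.2))
        (pvW arr s (t - s), m)).2) ∧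
    ((((PySem.List.pyRange t (PySem.List.len arr) 1).foldl
        (fun (st : Int × Int) e =>
          let balance := st.1 + (if PySem.List.pyGetD arr e "" = "A" then 1 else -1)
          (balance, if balance = 0 ∧ e - s + 1 > st.2 then e - s + 1 else st.2))
        (pvW arr s (t - s), m)).2) = m ∨
      ∃ L, pvQ arr s L ∧ (((PySem.List.pyRange t (PySem.List.len arr) 1).foldl
        (fun (st : Int × Int) e =>
          let balance := st.1 + (if PySem.List.pyGetD arr e "" = "A" then 1 else -1)
          (balance, if balance = 0 ∧ e - s + 1 > st.2 then e - s + 1 else st.2))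
        (pvW arr s (t - s), m)).2) = L) ∧
    (∀ L, pvQ arr s L → t - s < L → L ≤ (((PySem.List.pyRange t (PySem.List.len arr) 1).foldl
        (fun (st : Int × Int) e =>
          let balance := st.1 + (if PySem.List.pyGetD arr e "" = "A" then 1 else -1)
          (balance, if balance = 0 ∧ e - s + 1 > st.2 then e - s + 1 else st.2))
        (pvW arr s (t - s), m)).2)) := by
  intro k
  induction k with
  | zero =>
    intro t m hst hlen
    push_cast at hlen
    rw [PySem.List.len_eq, PySem.List.pyRange_one_eq_nil (by omega)]
    simp only [List.foldl_nil]
    refine ⟨le_refl m, Or.inl ?_, ?_⟩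
    · trivial
    intro L hQ hlt
    obtain ⟨_, _, hle, _⟩ := hQ
    omega
  | succ k ih =>
    intro t m hst hlen
    simp only [PySem.List.len_eq] at ih ⊢
    push_cast at hlen
    have ht : t < (arr.length : Int) := by omega
    have htN : t.toNat < arr.length := by omega
    rw [PySem.List.pyRange_one_cons ht]
    simp only [List.foldl_cons]
    have hget : PySem.List.pyGetD arr t "" = arr[t.toNat] :=
      PySem.List.pyGetD_eq_getElem arr "" (by omega) (by omega)
    rw [hget]
    have hbal : pvW arr s (t - s) + (if arr[t.toNat] = "A" then (1 : Int) else -1)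
        = pvW arr s (t + 1 - s) := by
      have h := pvW_snoc arr s t hs hst htN
      rw [show t + 1 - s = t - s + 1 by ring, h]
      simp [pvBal]
    rw [hbal]
    set m' : Int := if pvW arr s (t + 1 - s) = 0 ∧ t - s + 1 > m then t - s + 1 else m with hm'
    obtain ⟨ih1, ih2, ih3⟩ := ih (t + 1) m' (by omega) (by omega)
    have hmm' : m ≤ m' := by
      rw [hm']; split
      · next h => omega
      · exact le_refl m
    refine ⟨le_trans hmm' ih1, ?_, ?_⟩
    · rcases ih2 with h | h
      · rw [h, hm']
        by_cases hc : pvW arr s (t + 1 - s) = 0 ∧ t - s + 1 > m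
        · right
          refine ⟨t - s + 1, ?_, by rw [if_pos hc]⟩
          unfold pvQ
          refine ⟨hs, by omega, by omega, ?_⟩
          rw [show t - s + 1 = t + 1 - s by ring]; exact hc.1
        · left; rw [if_neg hc]
      · right; exact h
    · intro L hQ hlt
      by_cases hL : L = t - s + 1
      · subst hL
        obtain ⟨_, _, _, hW0⟩ := hQ
        rw [show t - s + 1 = t + 1 - s by ring] at hW0
        have hm'' : t - s + 1 ≤ m' := by
          rw [hm']
          by_cases hc : pvW arr s (t + 1 - s) = 0 ∧ t - s + 1 > m
          · rw [if_pos hc]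
          · rw [if_neg hc]
            have hgt : ¬ (t - s + 1 > m) := fun hgt => hc ⟨hW0, hgt⟩
            omega
        exact le_trans hm'' ih1
      · obtain ⟨hq1, hq2, hq3, hq4⟩ := hQ
        exact ih3 L ⟨hq1, hq2, hq3, hq4⟩ (by omega)

-- A's inner counting loop and middle loop, named for reuse in the proofs
def pvInnerA (arr : List String) (s L : Int) : Int × Int :=
  (PySem.List.pyRange s (s + L) 1).foldl
    (fun (ab : Int × Int) indInSubArray =>
      if PySem.List.pyGetD arr indInSubArray "" = "A" then (ab.1 + 1, ab.2) else (ab.1, ab.2 + 1))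
    ((0 : Int), (0 : Int))

def pvMidA (arr : List String) (L m : Int) : Int :=
  (PySem.List.pyRange 0 (PySem.List.len arr - (L - 1)) 1).foldl
    (fun maxLen startInd =>
      let p := pvInnerA arr startInd L
      if p.1 = p.2 then max maxLen L else maxLen) m

lemma pvA_eq (arr : List String) :
    findLongestMatchSubarray arr =
      (PySem.List.pyRange 1 (PySem.List.len arr + 1) 1).foldl (fun m L => pvMidA arr L m) 0 := rfl

lemma pvA_cond (arr : List String) (s L : Int) (h0 : 0 ≤ s) (h1 : 0 ≤ L)
    (h2 : s + L ≤ (arr.length : Int)) :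
    (pvInnerA arr s L).1 = (pvInnerA arr s L).2 ↔ pvW arr s L = 0 := by
  have hc : ((L.toNat : Int)) = L := Int.toNat_of_nonneg h1
  have h := pvA_inner arr L.toNat s 0 0 h0 (by rw [hc]; exact h2)
  rw [hc] at h
  unfold pvInnerA
  constructor <;> intro hx <;> omega

lemma pvA_mid_spec (arr : List String) (L : Int) (hL1 : 1 ≤ L) (hLn : L ≤ (arr.length : Int))
    (m : Int) :
    m ≤ pvMidA arr L m ∧
    (pvMidA arr L m = m ∨ ∃ s L', pvQ arr s L' ∧ pvMidA arr L m = L') ∧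
    (∀ s, pvQ arr s L → L ≤ pvMidA arr L m) := by
  unfold pvMidA
  simp only [PySem.List.len_eq]
  obtain ⟨c1, c2, c3⟩ := pvFoldMax (fun r => ∃ s L', pvQ arr s L' ∧ r = L')
    (fun start v => pvQ arr start L ∧ v = L)
    (fun maxLen startInd =>
      let p := pvInnerA arr startInd L
      if p.1 = p.2 then max maxLen L else maxLen)
    (PySem.List.pyRange 0 ((arr.length : Int) - (L - 1)) 1)
    (by intro m x hx
        dsimp only
        split
        · exact le_max_left m L
        · exact le_refl m)
    (by intro m x hx
        obtain ⟨hx0, hx1⟩ := PySem.List.mem_pyRange_one.mp hx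
        dsimp only
        split
        · next h =>
          rcases max_choice m L with hm | hm <;> rw [hm]
          · exact Or.inl rfl
          · exact Or.inr ⟨x, L, ⟨hx0, hL1, by omega, (pvA_cond arr x L hx0 (by omega) (by omega)).mp h⟩, rfl⟩
        · exact Or.inl rfl)
    (by intro m x v hx hC
        obtain ⟨hQ, rfl⟩ := hC
        obtain ⟨hq0, hq1, hq2, hq3⟩ := hQ
        dsimp only
        rw [if_pos ((pvA_cond arr x v hq0 (by omega) hq2).mpr hq3)]
        exact le_max_right m v)
    m
  refine ⟨c1, c2, ?_⟩
  intro s hQ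
  obtain ⟨hq0, hq1, hq2, hq3⟩ := hQ
  exact c3 s (PySem.List.mem_pyRange_one.mpr ⟨hq0, by omega⟩) L ⟨⟨hq0, hq1, hq2, hq3⟩, rfl⟩

lemma pvA_isBest (arr : List String) : pvIsBest arr (findLongestMatchSubarray arr) := by
  rw [pvA_eq]
  simp only [PySem.List.len_eq]
  obtain ⟨c1, c2, c3⟩ := pvFoldMax (fun r => ∃ s L, pvQ arr s L ∧ r = L)
    (fun L v => ∃ s, pvQ arr s L ∧ v = L)
    (fun m L => pvMidA arr L m)
    (PySem.List.pyRange 1 ((arr.length : Int) + 1) 1)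
    (by intro m L hL
        obtain ⟨hL1, hL2⟩ := PySem.List.mem_pyRange_one.mp hL
        exact (pvA_mid_spec arr L hL1 (by omega) m).1)
    (by intro m L hL
        obtain ⟨hL1, hL2⟩ := PySem.List.mem_pyRange_one.mp hL
        exact (pvA_mid_spec arr L hL1 (by omega) m).2.1)
    (by intro m L v hL hC
        obtain ⟨hL1, hL2⟩ := PySem.List.mem_pyRange_one.mp hL
        obtain ⟨s, hQ, rfl⟩ := hC
        exact (pvA_mid_spec arr v hL1 (by omega) m).2.2 s hQ)
    0
  unfold pvIsBest
  refine ⟨c1, c2, ?_⟩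
  intro s L hQ
  obtain ⟨hq0, hq1, hq2, hq3⟩ := hQ
  exact c3 L (PySem.List.mem_pyRange_one.mpr ⟨hq1, by omega⟩) L ⟨s, ⟨hq0, hq1, hq2, hq3⟩, rfl⟩

-- B's inner loop, named for reuse
def pvInnerB (arr : List String) (start m : Int) : Int × Int :=
  (PySem.List.pyRange start (PySem.List.len arr) 1).foldl
    (fun (st : Int × Int) e =>
      let balance := st.1 + (if PySem.List.pyGetD arr e "" = "A" then 1 else -1)
      (balance, if balance = 0 ∧ e - start + 1 > st.2 then e - start + 1 else st.2))
    ((0 : Int), m)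

lemma pvB_eq (arr : List String) :
    findLongestMatchSubarray_alt arr =
      (PySem.List.pyRange 0 (PySem.List.len arr) 1).foldl
        (fun m start => (pvInnerB arr start m).2) 0 := rfl

lemma pvB_inner_spec (arr : List String) (s : Int) (hs : 0 ≤ s) (hsn : s ≤ (arr.length : Int))
    (m : Int) :
    m ≤ (pvInnerB arr s m).2 ∧
    ((pvInnerB arr s m).2 = m ∨ ∃ L, pvQ arr s L ∧ (pvInnerB arr s m).2 = L) ∧
    (∀ L, pvQ arr s L → L ≤ (pvInnerB arr s m).2) := by
  have h0 : pvW arr s (s - s) = 0 := by rw [sub_self]; exact pvW_nonpos arr s 0 le_rfl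
  have h := pvB_inner arr s hs ((arr.length : Int) - s).toNat s m le_rfl (by omega)
  rw [h0] at h
  unfold pvInnerB
  obtain ⟨h1, h2, h3⟩ := h
  refine ⟨h1, h2, ?_⟩
  intro L hQ
  obtain ⟨hq0, hq1, hq2, hq3⟩ := hQ
  exact h3 L ⟨hq0, hq1, hq2, hq3⟩ (by omega)

lemma pvB_isBest (arr : List String) : pvIsBest arr (findLongestMatchSubarray_alt arr) := by
  rw [pvB_eq]
  simp only [PySem.List.len_eq]
  obtain ⟨c1, c2, c3⟩ := pvFoldMax (fun r => ∃ s L, pvQ arr s L ∧ r = L)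
    (fun start v => ∃ L, pvQ arr start L ∧ v = L)
    (fun m start => (pvInnerB arr start m).2)
    (PySem.List.pyRange 0 ((arr.length : Int)) 1)
    (by intro m x hx
        obtain ⟨hx0, hx1⟩ := PySem.List.mem_pyRange_one.mp hx
        exact (pvB_inner_spec arr x hx0 (by omega) m).1)
    (by intro m x hx
        obtain ⟨hx0, hx1⟩ := PySem.List.mem_pyRange_one.mp hx
        rcases (pvB_inner_spec arr x hx0 (by omega) m).2.1 with h | ⟨L, hQ, hr⟩
        · exact Or.inl h
        · exact Or.inr ⟨x, L, hQ, hr⟩)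
    (by intro m x v hx hC
        obtain ⟨hx0, hx1⟩ := PySem.List.mem_pyRange_one.mp hx
        obtain ⟨L, hQ, rfl⟩ := hC
        exact (pvB_inner_spec arr x hx0 (by omega) m).2.2 v hQ)
    0
  unfold pvIsBest
  refine ⟨c1, c2, ?_⟩
  intro s L hQ
  obtain ⟨hq0, hq1, hq2, hq3⟩ := hQ
  exact c3 s (PySem.List.mem_pyRange_one.mpr ⟨hq0, by omega⟩) L ⟨L, ⟨hq0, hq1, hq2, hq3⟩, rfl⟩

-- ===== VERDICT (by name: the statement is the Claim_ definition above) =====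
theorem findLongestMatchSubarray_spec : Claim_equal_findLongestMatchSubarray := by
  intro array _hdom
  unfold Spec_findLongestMatchSubarray
  exact pvIsBest_unique array _ _ (pvA_isBest array) (pvB_isBest array)
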